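-- pv_equiv track=rewrite | github.com/knodemycode/PythonCamp | FractalTree/fractaltree.py | generateSpiral
-- ===== SOURCE A (Python) =====
-- def generateSpiral(layer, seed="RF", ruleset=["R","L","L","R"]):
--     if (layer == 0):
--         return seed
--     spiral = ""
--     #reverse l and r
--     for gene in seed:
--         if (gene == ruleset[0]):
--             spiral += ruleset[1]
--         elif (gene == ruleset[2]):
--             spiral += ruleset[3]
--         else:
--             spiral += gene
--     spiral= spiral[::-1]#flipped
--     spiral= spiral[1:]+"F"#move Forward command to the end
--
--     return generateSpiral(layer-1, seed+"RF"+spiral, ruleset)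
-- ===== SOURCE B (Python) =====
-- def generateSpiral(layer, seed="RF", ruleset=["R","L","L","R"]):
--     for _ in range(layer):
--         trans = {ruleset[2]: ruleset[3], ruleset[0]: ruleset[1]}
--         body = "".join(trans.get(g, g) for g in seed)[::-1]
--         seed += "RF" + body[1:] + "F"
--     return seed
-- ===== Notes on version B (the rewrite author's own statement) =====
-- stated objective: simpler
-- what changed: Replaces the tail recursion and the per-character if/elif accumulation with an explicit for-loop over layers that builds each transformed string via a substitution dict and a join comprehension.
-- outside the precondition, e.g. on generateSpiral(1, '', ['x']): A returns 'RFF', B raises IndexError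
import Mathlib
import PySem

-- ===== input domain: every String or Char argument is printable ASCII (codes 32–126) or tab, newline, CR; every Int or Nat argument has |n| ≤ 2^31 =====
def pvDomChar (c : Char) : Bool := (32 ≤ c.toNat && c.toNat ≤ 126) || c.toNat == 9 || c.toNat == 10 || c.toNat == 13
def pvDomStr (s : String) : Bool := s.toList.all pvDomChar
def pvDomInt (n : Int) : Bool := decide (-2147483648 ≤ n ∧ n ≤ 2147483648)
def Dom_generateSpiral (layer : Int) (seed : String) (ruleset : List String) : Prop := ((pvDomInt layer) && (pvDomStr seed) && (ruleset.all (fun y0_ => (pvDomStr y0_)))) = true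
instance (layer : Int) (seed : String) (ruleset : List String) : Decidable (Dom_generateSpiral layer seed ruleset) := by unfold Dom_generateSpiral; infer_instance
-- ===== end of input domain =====

-- B replaces A's tail recursion and if/elif character accumulation by an explicit
-- per-layer loop with a substitution dict and a join over the seed (objective: simpler).

-- ===== PORT A =====
-- Literal port of A. The `layer < 0` branch is only a totality guard: there the Python
-- recursion never returns (RecursionError), and such inputs are outside Pre_.
-- ruleset[i] is ported as getD i "" (exact under Pre_, which forces 4 ≤ ruleset.length
-- whenever this code path is reached); spiral[::-1] / spiral[1:] are exact as
-- toList.reverse / toList.drop 1 on strings.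
def generateSpiral (layer : Int) (seed : String) (ruleset : List String) : String :=
  if layer = 0 then seed
  else if layer < 0 then seed
  else
    let spiral := seed.toList.foldl (fun acc gene =>
      if String.ofList [gene] = ruleset.getD 0 "" then acc ++ ruleset.getD 1 ""
      else if String.ofList [gene] = ruleset.getD 2 "" then acc ++ ruleset.getD 3 ""
      else acc ++ String.ofList [gene]) ""
    let flipped := String.ofList spiral.toList.reverse
    let moved := String.ofList (flipped.toList.drop 1) ++ "F"
    generateSpiral (layer - 1) (seed ++ "RF" ++ moved) ruleset
termination_by layer.toNat
decreasing_by simp_all; omega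

-- ===== PORT B =====
-- {ruleset[2]: ruleset[3], ruleset[0]: ruleset[1]}
def spiralTrans (ruleset : List String) : PySem.Dict String String :=
  (PySem.Dict.empty.insert (ruleset.getD 2 "") (ruleset.getD 3 "")).insert
    (ruleset.getD 0 "") (ruleset.getD 1 "")

-- "".join(trans.get(g, g) for g in seed)[::-1]
def spiralBody (trans : PySem.Dict String String) (seed : String) : String :=
  String.ofList (PySem.Str.join "" (seed.toList.map
    (fun g => trans.getD (String.ofList [g]) (String.ofList [g])))).toList.reverse

-- for _ in range(layer): ... seed += "RF" + body[1:] + "F"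
def spiralLoop (ruleset : List String) : Nat → String → String
  | 0, seed => seed
  | n+1, seed =>
    let trans := spiralTrans ruleset
    let body := spiralBody trans seed
    spiralLoop ruleset n (seed ++ "RF" ++ (String.ofList (body.toList.drop 1) ++ "F"))

def generateSpiral_alt (layer : Int) (seed : String) (ruleset : List String) : String :=
  spiralLoop ruleset layer.toNat seed

-- ===== PRECONDITION & SPEC =====
-- Pre_ excludes negative layers (A recurses forever, RecursionError) and positive layers
-- with fewer than 4 rules, where A raises IndexError on any character that falls through
-- to a missing rule; on a few degenerate short-ruleset inputs (e.g. an empty seed at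
-- layer 1) A happens to return before probing the missing indices, but B's dict build
-- naturally raises IndexError there, so those stay excluded too.
def Pre_generateSpiral (layer : Int) (seed : String) (ruleset : List String) : Prop :=
  0 ≤ layer ∧ (layer = 0 ∨ 4 ≤ ruleset.length)
instance (layer : Int) (seed : String) (ruleset : List String) : Decidable (Pre_generateSpiral layer seed ruleset) := by unfold Pre_generateSpiral; infer_instance

def pvWitness_generateSpiral : Int × String × List String := (2, "RF", ["R","L","L","R"])

def Spec_generateSpiral (layer : Int) (seed : String) (ruleset : List String) (out : String) : Prop := out = generateSpiral_alt layer seed ruleset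
instance (layer : Int) (seed : String) (ruleset : List String) (out : String) : Decidable (Spec_generateSpiral layer seed ruleset out) := by unfold Spec_generateSpiral; infer_instance

-- ===== CLAIM (what is proved, stated in full; the proofs are below) =====
def Claim_equal_generateSpiral : Prop := ∀ (layer : Int) (seed : String) (ruleset : List String), Dom_generateSpiral layer seed ruleset → Pre_generateSpiral layer seed ruleset → Spec_generateSpiral layer seed ruleset (generateSpiral layer seed ruleset)

-- ===== LEMMAS AND PROOFS =====

-- The per-character maps of A (if/elif chain) and B (dict lookup) agree.
theorem spiralChar_eq (ruleset : List String) (g : Char) :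
    (spiralTrans ruleset).getD (String.ofList [g]) (String.ofList [g]) =
      (if String.ofList [g] = ruleset.getD 0 "" then ruleset.getD 1 ""
       else if String.ofList [g] = ruleset.getD 2 "" then ruleset.getD 3 ""
       else String.ofList [g]) := by
  simp [spiralTrans, PySem.Dict.getD_insert, PySem.Dict.getD_empty]

-- A's accumulating foldl, as a flattened map on the character list.
theorem foldl_append_toList (f : Char → String) (l : List Char) (acc : String) :
    (l.foldl (fun a g => a ++ f g) acc).toList
      = acc.toList ++ (l.map (fun g => (f g).toList)).flatten := by
  induction l generalizing acc with
  | nil => simp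
  | cons x xs ih => simp [List.foldl_cons, ih]

-- ''.join with empty separator is flatten (on code-point lists).
theorem chars_join_empty (parts : List (List Char)) :
    PySem.Chars.join [] parts = parts.flatten := by
  induction parts with
  | nil => simp [PySem.Chars.join_nil]
  | cons x xs ih =>
    cases xs with
    | nil => simp [PySem.Chars.join_singleton]
    | cons y ys => simpa [PySem.Chars.join_cons_cons] using ih

-- One layer of A equals one layer of B.
theorem step_eq (ruleset : List String) (seed : String) :
    (String.ofList ((String.ofList ((seed.toList.foldl (fun acc gene =>
        if String.ofList [gene] = ruleset.getD 0 "" then acc ++ ruleset.getD 1 ""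
        else if String.ofList [gene] = ruleset.getD 2 "" then acc ++ ruleset.getD 3 ""
        else acc ++ String.ofList [gene]) "").toList.reverse)).toList.drop 1) ++ "F")
      = String.ofList ((spiralBody (spiralTrans ruleset) seed).toList.drop 1) ++ "F" := by
  have hfun : (fun (acc : String) gene =>
      if String.ofList [gene] = ruleset.getD 0 "" then acc ++ ruleset.getD 1 ""
      else if String.ofList [gene] = ruleset.getD 2 "" then acc ++ ruleset.getD 3 ""
      else acc ++ String.ofList [gene])
    = (fun (acc : String) g =>
        acc ++ (spiralTrans ruleset).getD (String.ofList [g]) (String.ofList [g])) := by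
    funext acc g
    rw [spiralChar_eq]
    split_ifs <;> rfl
  rw [hfun, foldl_append_toList]
  simp [spiralBody, chars_join_empty, Function.comp_def]

theorem main_eq (ruleset : List String) (n : Nat) (seed : String) :
    generateSpiral (n : Int) seed ruleset = spiralLoop ruleset n seed := by
  induction n generalizing seed with
  | zero => simp [generateSpiral, spiralLoop]
  | succ k ih =>
    rw [generateSpiral]
    have h0 : ¬((k + 1 : Nat) : Int) = 0 := by omega
    have h1 : ¬((k + 1 : Nat) : Int) < 0 := by omega
    simp only [h0, h1, if_false]
    have h2 : ((k + 1 : Nat) : Int) - 1 = (k : Int) := by omega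
    rw [h2, step_eq, ih]
    rfl

-- ===== VERDICT (by name: the statement is the Claim_ definition above) =====
theorem generateSpiral_spec : Claim_equal_generateSpiral := by
  intro layer seed ruleset _ hpre
  unfold Spec_generateSpiral generateSpiral_alt
  obtain ⟨h0, _⟩ := hpre
  have h : layer = (layer.toNat : Int) := by omega
  conv_lhs => rw [h]
  exact main_eq ruleset layer.toNat seed
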